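-- pv_equiv track=rewrite | github.com/benquick123/code-profiling | code/batch-1/vse-naloge-brez-testov/DN7-M-36.py | preberi_pot
-- ===== SOURCE A (Python) =====
-- def preberi_pot(ukazi):
--     start = s = (0,0)
--     route = [start]
--     current_possition = cs = start
--     axis = a = 3 #1 is positive y, 2 is negative x, 3 is negative y, 4 is positive x
--
--     for ukaz in ukazi.split():
--         if ukaz == "DESNO":
--             a += 1
--             if a > 4:
--                 a = a - 4
--         elif ukaz == "LEVO":
--             a -= 1
--             if a == 0:
--                 a = 4
--         else:
--             if a == 1:
--                 cs = (cs[0], cs[1] + int(ukaz))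
--             if a == 2:
--                 cs = (cs[0] - int(ukaz), cs[1])
--             if a == 3:
--                 cs = (cs[0], cs[1] - int(ukaz))
--             if a == 4:
--                 cs = (cs[0] + int(ukaz), cs[1])
--             route.append(cs)
--     return route
-- ===== SOURCE B (Python) =====
-- def preberi_pot(ukazi):
--     toks = ukazi.split()
--     # stage 1: net right-turn count before each token (prefix sums of turn deltas)
--     pref = []
--     h = 0
--     for t in toks:
--         pref.append(h)
--         h += (t == "DESNO") - (t == "LEVO")
--     # stage 2: displacement vector contributed by each numeric token
--     DIRS = [(0, -1), (1, 0), (0, 1), (-1, 0)]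
--     deltas = [(int(t) * DIRS[p % 4][0], int(t) * DIRS[p % 4][1])
--               for t, p in zip(toks, pref) if t != "DESNO" and t != "LEVO"]
--     # stage 3: route = running sums of the displacements from (0, 0)
--     route = [(0, 0)]
--     for dx, dy in deltas:
--         x, y = route[-1]
--         route.append((x + dx, y + dy))
--     return route
-- ===== Notes on version B (the rewrite author's own statement) =====
-- stated objective: alternative
-- what changed: B replaces A's single stateful interpreter loop by a three-stage pipeline: a prefix-sum pass computing the net turn count before each token, a comprehension mapping each numeric token to its displacement vector via DIRS[turns % 4], and a running-sum pass turning the displacement list into the route.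
import Mathlib
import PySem

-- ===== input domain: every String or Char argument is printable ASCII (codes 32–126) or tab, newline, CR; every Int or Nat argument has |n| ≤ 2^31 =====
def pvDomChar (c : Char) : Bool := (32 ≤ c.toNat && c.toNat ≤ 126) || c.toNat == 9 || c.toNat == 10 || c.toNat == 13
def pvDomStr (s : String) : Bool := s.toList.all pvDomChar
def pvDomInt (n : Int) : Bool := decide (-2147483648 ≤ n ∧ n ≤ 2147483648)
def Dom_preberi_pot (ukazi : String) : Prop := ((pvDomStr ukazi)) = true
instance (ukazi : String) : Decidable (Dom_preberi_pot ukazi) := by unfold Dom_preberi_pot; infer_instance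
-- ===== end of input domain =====

-- B replaces A's stateful interpreter loop by a three-stage pipeline (turn prefix sums,
-- displacement vectors, running sums); objective: alternative decomposition.

-- ===== PORT A =====
-- int(ukaz): under Pre_ every non-command token parses, so getD 0 is exact there.
def pvAstep (st : (List (Int × Int)) × (Int × Int) × Int) (ukaz : String) :
    (List (Int × Int)) × (Int × Int) × Int :=
  let route := st.1; let cs := st.2.1; let a := st.2.2
  if ukaz = "DESNO" then
    let a := a + 1
    let a := if a > 4 then a - 4 else a
    (route, cs, a)
  else if ukaz = "LEVO" then
    let a := a - 1
    let a := if a = 0 then (4 : Int) else a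
    (route, cs, a)
  else
    let n := (PySem.Int.ofStr? ukaz).getD 0
    let cs := if a = 1 then (cs.1, cs.2 + n) else cs
    let cs := if a = 2 then (cs.1 - n, cs.2) else cs
    let cs := if a = 3 then (cs.1, cs.2 - n) else cs
    let cs := if a = 4 then (cs.1 + n, cs.2) else cs
    (route ++ [cs], cs, a)

def preberi_pot (ukazi : String) : List (Int × Int) :=
  ((PySem.Str.split₀ ukazi).foldl pvAstep ([(0, 0)], (0, 0), 3)).1

-- ===== PORT B =====
def pvDIRS : List (Int × Int) := [(0, -1), (1, 0), (0, 1), (-1, 0)]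

-- stage 1 loop body: pref.append(h); h += (t == "DESNO") - (t == "LEVO")
def pvPrefStep (st : List Int × Int) (t : String) : List Int × Int :=
  (st.1 ++ [st.2],
   st.2 + ((if t = "DESNO" then 1 else 0) - (if t = "LEVO" then 1 else 0)))

-- stage 2 comprehension body: (int(t) * DIRS[p % 4][0], int(t) * DIRS[p % 4][1])
def pvDelta (t : String) (p : Int) : Int × Int :=
  let n := (PySem.Int.ofStr? t).getD 0
  let d := (PySem.List.pyGet? pvDIRS (PySem.Int.mod p 4)).getD (0, 0)
  (n * d.1, n * d.2)

-- stage 3 loop body: x, y = route[-1]; route.append((x + dx, y + dy))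
def pvAccStep (route : List (Int × Int)) (d : Int × Int) : List (Int × Int) :=
  let last := (PySem.List.pyGet? route (-1)).getD (0, 0)
  route ++ [(last.1 + d.1, last.2 + d.2)]

def preberi_pot_alt (ukazi : String) : List (Int × Int) :=
  let toks := PySem.Str.split₀ ukazi
  let pref := (toks.foldl pvPrefStep ([], 0)).1
  let deltas := ((toks.zip pref).filter
      (fun tp => !(tp.1 == "DESNO") && !(tp.1 == "LEVO"))).map
      (fun tp => pvDelta tp.1 tp.2)
  deltas.foldl pvAccStep [(0, 0)]

-- ===== PRECONDITION & SPEC =====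
-- Pre_ excludes exactly the inputs where Python A raises ValueError: a token that is
-- neither a turn command nor an int literal.
def Pre_preberi_pot (ukazi : String) : Prop :=
  ∀ tok ∈ PySem.Str.split₀ ukazi,
    tok = "DESNO" ∨ tok = "LEVO" ∨ (PySem.Int.ofStr? tok).isSome = true
instance (ukazi : String) : Decidable (Pre_preberi_pot ukazi) := by
  unfold Pre_preberi_pot; infer_instance
def pvWitness_preberi_pot : String := "10 DESNO 3 LEVO LEVO 2"
def Spec_preberi_pot (ukazi : String) (out : List (Int × Int)) : Prop := out = preberi_pot_alt ukazi
instance (ukazi : String) (out : List (Int × Int)) : Decidable (Spec_preberi_pot ukazi out) := by unfold Spec_preberi_pot; infer_instance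

-- ===== CLAIM (what is proved, stated in full; the proofs are below) =====
def Claim_equal_preberi_pot : Prop := ∀ (ukazi : String), Dom_preberi_pot ukazi → Pre_preberi_pot ukazi → Spec_preberi_pot ukazi (preberi_pot ukazi)

-- ===== LEMMAS AND PROOFS =====

-- common reference: route tail produced from position cs with net turn count h
def pvRef (toks : List String) (cs : Int × Int) (h : Int) : List (Int × Int) :=
  match toks with
  | [] => []
  | t :: ts =>
    if t = "DESNO" then pvRef ts cs (h + 1)
    else if t = "LEVO" then pvRef ts cs (h - 1)
    else
      let d := pvDelta t h
      pvRef ts (cs.1 + d.1, cs.2 + d.2) h |> ((cs.1 + d.1, cs.2 + d.2) :: ·)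

-- A's axis value corresponding to net turn count h
def pvAOf (h : Int) : Int :=
  if h % 4 = 0 then 3 else if h % 4 = 1 then 4 else if h % 4 = 2 then 1 else 2

lemma pvA_eq_ref (toks : List String) :
    ∀ (route : List (Int × Int)) (cs : Int × Int) (h : Int),
      (toks.foldl pvAstep (route, cs, pvAOf h)).1 = route ++ pvRef toks cs h := by
  induction toks with
  | nil => intro route cs h; simp [pvRef]
  | cons t ts ih =>
    intro route cs h
    have hk : h % 4 = 0 ∨ h % 4 = 1 ∨ h % 4 = 2 ∨ h % 4 = 3 := by omega
    simp only [List.foldl_cons]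
    by_cases h1 : t = "DESNO"
    · have : pvAstep (route, cs, pvAOf h) t = (route, cs, pvAOf (h + 1)) := by
        rcases hk with hk | hk | hk | hk <;>
          simp [pvAstep, pvAOf, h1, hk, show (h+1) % 4 = (h%4+1)%4 by omega]
      rw [this, ih route cs (h + 1)]
      simp [pvRef, h1]
    · by_cases h2 : t = "LEVO"
      · have : pvAstep (route, cs, pvAOf h) t = (route, cs, pvAOf (h - 1)) := by
          rcases hk with hk | hk | hk | hk <;>
            simp [pvAstep, pvAOf, h2, hk, show (h-1) % 4 = (h%4+3)%4 by omega]
        rw [this, ih route cs (h - 1)]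
        simp [pvRef, h2]
      · set n := (PySem.Int.ofStr? t).getD 0 with hn
        have : pvAstep (route, cs, pvAOf h) t
            = (route ++ [(cs.1 + (pvDelta t h).1, cs.2 + (pvDelta t h).2)],
               (cs.1 + (pvDelta t h).1, cs.2 + (pvDelta t h).2), pvAOf h) := by
          rcases hk with hk | hk | hk | hk <;>
            simp [pvAstep, pvAOf, pvDelta, pvDIRS, h1, h2, hk, ← hn,
                  PySem.List.pyGet?, PySem.List.pyIdx?] <;> ring_nf
        rw [this, ih]
        simp [pvRef, h1, h2]

-- stage-1 characterisation
def pvPrefL (h : Int) : List String → List Int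
  | [] => []
  | t :: ts => h :: pvPrefL (h + ((if t = "DESNO" then 1 else 0) - (if t = "LEVO" then 1 else 0))) ts

lemma pvPref_fold (toks : List String) :
    ∀ (acc : List Int) (h : Int),
      (toks.foldl pvPrefStep (acc, h)).1 = acc ++ pvPrefL h toks := by
  induction toks with
  | nil => intro acc h; simp [pvPrefL]
  | cons t ts ih =>
    intro acc h
    simp only [List.foldl_cons, pvPrefStep]
    rw [ih]
    simp [pvPrefL]

-- stages 1+2 combined equal the recursive delta list
def pvDeltasL (h : Int) : List String → List (Int × Int)
  | [] => []
  | t :: ts =>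
    if t = "DESNO" then pvDeltasL (h + 1) ts
    else if t = "LEVO" then pvDeltasL (h - 1) ts
    else pvDelta t h :: pvDeltasL h ts

lemma pvDeltas_eq (toks : List String) :
    ∀ (h : Int),
      (((toks.zip (pvPrefL h toks)).filter
          (fun tp => !(tp.1 == "DESNO") && !(tp.1 == "LEVO"))).map
          (fun tp => pvDelta tp.1 tp.2)) = pvDeltasL h toks := by
  induction toks with
  | nil => intro h; simp [pvPrefL, pvDeltasL]
  | cons t ts ih =>
    intro h
    by_cases h1 : t = "DESNO"
    · simp [pvPrefL, pvDeltasL, h1, ih]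
    · by_cases h2 : t = "LEVO"
      · simp [pvPrefL, pvDeltasL, h2, ih, sub_eq_add_neg]
      · simp [pvPrefL, pvDeltasL, h1, h2, ih]

-- stage 3 turns the delta list into the reference route
lemma pvAcc_ref (toks : List String) :
    ∀ (h : Int) (pre : List (Int × Int)) (cs : Int × Int),
      (pvDeltasL h toks).foldl pvAccStep (pre ++ [cs]) = pre ++ cs :: pvRef toks cs h := by
  induction toks with
  | nil => intro h pre cs; simp [pvDeltasL, pvRef]
  | cons t ts ih =>
    intro h pre cs
    by_cases h1 : t = "DESNO"
    · simp [pvDeltasL, pvRef, h1, ih]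
    · by_cases h2 : t = "LEVO"
      · simp [pvDeltasL, pvRef, h2, ih]
      · simp only [pvDeltasL, pvRef, h1, h2, if_false, List.foldl_cons]
        have hstep : pvAccStep (pre ++ [cs]) (pvDelta t h)
            = (pre ++ [cs]) ++ [(cs.1 + (pvDelta t h).1, cs.2 + (pvDelta t h).2)] := by
          simp [pvAccStep, PySem.List.pyGet?_neg_one_append_singleton]
        rw [hstep]
        have := ih h (pre ++ [cs]) (cs.1 + (pvDelta t h).1, cs.2 + (pvDelta t h).2)
        simpa using this

-- ===== VERDICT (by name: the statement is the Claim_ definition above) =====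
theorem preberi_pot_spec : Claim_equal_preberi_pot := by
  intro ukazi _ _
  unfold Spec_preberi_pot preberi_pot preberi_pot_alt
  have hA := pvA_eq_ref (PySem.Str.split₀ ukazi) [(0, 0)] (0, 0) 0
  have hB := pvAcc_ref (PySem.Str.split₀ ukazi) 0 [] (0, 0)
  simp only [pvAOf, show (0:Int) % 4 = 0 by norm_num, if_true] at hA
  simp only [hA, pvPref_fold, pvDeltas_eq, List.nil_append]
  simpa using hB.symm
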